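-- pv_equiv track=rewrite | github.com/rb-cbenson/CC-AIProgress | scripts/gap-analysis.py | check_developer_duplicates
-- ===== SOURCE A (Python) =====
-- def check_developer_duplicates(tools):
--     """Find developer name inconsistencies."""
--     devs = {}
--     for t in tools:
--         dev = t.get("developer", "")
--         normalized = dev.lower().strip().rstrip(".")
--         if normalized not in devs:
--             devs[normalized] = set()
--         devs[normalized].add(dev)
--     return {k: sorted(v) for k, v in devs.items() if len(v) > 1}
-- ===== SOURCE B (Python) =====
-- def check_developer_duplicates(tools):
--     """Find developer name inconsistencies."""
--     pairs = [(d.lower().strip().rstrip("."), d)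
--              for d in (t.get("developer", "") for t in tools)]
--     result = {}
--     for key in dict.fromkeys(k for k, _ in pairs):
--         names = sorted({d for k, d in pairs if k == key})
--         if len(names) > 1:
--             result[key] = names
--     return result
-- ===== Notes on version B (the rewrite author's own statement) =====
-- stated objective: alternative
-- what changed: Instead of one pass that mutates a dict of growing sets, B precomputes the (normalized, original) pair list, iterates the distinct normalized keys (first-occurrence order via dict.fromkeys) and gathers each group's name set with a per-key comprehension scan over the pairs.
import Mathlib
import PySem

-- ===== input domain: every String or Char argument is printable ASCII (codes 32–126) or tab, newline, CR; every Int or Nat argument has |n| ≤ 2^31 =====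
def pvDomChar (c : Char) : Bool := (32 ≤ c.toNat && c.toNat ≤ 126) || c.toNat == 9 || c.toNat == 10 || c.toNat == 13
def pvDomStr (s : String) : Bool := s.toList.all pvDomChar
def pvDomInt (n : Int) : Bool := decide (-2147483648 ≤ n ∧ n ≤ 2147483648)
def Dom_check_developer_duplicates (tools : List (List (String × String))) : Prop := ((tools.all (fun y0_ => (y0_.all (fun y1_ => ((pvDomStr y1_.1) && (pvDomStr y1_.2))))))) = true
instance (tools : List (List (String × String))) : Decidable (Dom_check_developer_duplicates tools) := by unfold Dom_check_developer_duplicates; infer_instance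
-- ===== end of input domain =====

-- B replaces A's single pass mutating a dict of growing sets by a dedup of the normalized keys
-- followed by a per-key comprehension scan over the (normalized, original) pairs (objective: alternative decomposition).
-- ===== PORT A =====
-- t.get("developer", "")
def pvDev (t : List (String × String)) : String := (PySem.Dict.ofList t).getD "developer" ""
-- dev.lower().strip().rstrip(".") — rstrip(".") ported by hand (drop trailing '.' characters); exact for this one-char strip set
def pvNorm (s : String) : String :=
  String.ofList (((PySem.Chars.strip (PySem.Chars.lower s.toList)).reverse.dropWhile (fun c => c == '.')).reverse)

def check_developer_duplicates (tools : List (List (String × String))) : List (String × List String) :=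
  let devs : PySem.Dict String (PySem.Set String) :=
    tools.foldl (fun devs t =>
      let dev := pvDev t
      let normalized := pvNorm dev
      let devs := if devs.contains normalized then devs else devs.insert normalized PySem.Set.empty
      devs.modify normalized PySem.Set.empty (fun s => PySem.Set.add s dev)) PySem.Dict.empty
  (devs.items.filter (fun p => PySem.Set.len p.2 > 1)).map
    (fun p => (p.1, PySem.List.sorted p.2 (fun x => x) false))

-- ===== PORT B =====
def check_developer_duplicates_alt (tools : List (List (String × String))) : List (String × List String) :=
  let pairs : List (String × String) := tools.map (fun t => (pvNorm (pvDev t), pvDev t))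
  (PySem.List.dedup (pairs.map Prod.fst)).foldl (fun result key =>
    let names := PySem.List.sorted (PySem.Set.ofList ((pairs.filter (fun p => p.1 == key)).map Prod.snd)) (fun x => x) false
    if names.length > 1 then result ++ [(key, names)] else result) []

-- ===== PRECONDITION & SPEC =====
def Spec_check_developer_duplicates (tools : List (List (String × String))) (out : List (String × List String)) : Prop := out = check_developer_duplicates_alt tools
instance (tools : List (List (String × String))) (out : List (String × List String)) : Decidable (Spec_check_developer_duplicates tools out) := by unfold Spec_check_developer_duplicates; infer_instance

-- ===== CLAIM (what is proved, stated in full; the proofs are below) =====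
def Claim_equal_check_developer_duplicates : Prop := ∀ (tools : List (List (String × String))), Dom_check_developer_duplicates tools → Spec_check_developer_duplicates tools (check_developer_duplicates tools)

-- ===== LEMMAS AND PROOFS =====

-- A's two-statement body (membership guard + in-place add) is one Dict.modify
theorem pv_step_eq_modify (d : PySem.Dict String (PySem.Set String)) (k : String) (v : String) :
    (if d.contains k then d else d.insert k PySem.Set.empty).modify k PySem.Set.empty
      (fun s => PySem.Set.add s v)
    = d.modify k PySem.Set.empty (fun s => PySem.Set.add s v) := by
  by_cases h : d.contains k
  · simp [h]
  · simp only [h, Bool.false_eq_true, if_false]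
    simp only [PySem.Dict.modify, PySem.Dict.insert, PySem.Dict.getD, PySem.Dict.get?, PySem.Dict.contains] at *
    obtain ⟨items⟩ := d
    simp only [Bool.not_eq_true] at *
    rw [List.any_eq_false] at h
    have hid : ∀ p ∈ items, (p.1 == k) = false := by intro p hp; simpa using h p hp
    have hfind : items.find? (fun p => p.1 == k) = none := List.find?_eq_none.2 (by intro p hp; simp [hid p hp])
    have hany : (items.any fun p => p.1 == k) = false := List.any_eq_false.2 (by intro p hp; simp [hid p hp])
    simp [hfind, hany, List.find?_append, List.any_append]
    calc List.map (fun p => if p.1 = k then (k, [v]) else p) items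
        = List.map id items := List.map_congr_left (fun p hp => by
            simp [show p.1 ≠ k from by simpa using hid p hp])
      _ = items := List.map_id _

-- value of the grouping fold at one key
theorem pv_getD_fold (ts : List (List (String × String))) (d : PySem.Dict String (PySem.Set String)) (k : String) :
    (ts.foldl (fun d t => d.modify (pvNorm (pvDev t)) PySem.Set.empty
        (fun s => PySem.Set.add s (pvDev t))) d).getD k PySem.Set.empty
    = ((ts.filter (fun t => pvNorm (pvDev t) == k)).map pvDev).foldl PySem.Set.add
        (d.getD k PySem.Set.empty) := by
  induction ts generalizing d with
  | nil => simp
  | cons t ts ih =>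
    simp only [List.foldl_cons, List.filter_cons]
    rw [ih]
    by_cases hk : pvNorm (pvDev t) = k
    · simp [hk]
    · simp [hk, PySem.Dict.getD_modify, Ne.symm hk]

-- an item list with nodup keys is its key list paired with its lookups
theorem pv_items_eq_keys_map (l : List (String × PySem.Set String)) (h : (l.map Prod.fst).Nodup) :
    l = (l.map Prod.fst).map
      (fun k => (k, (PySem.Dict.mk l).getD k PySem.Set.empty)) := by
  induction l with
  | nil => simp
  | cons p rest ih =>
    obtain ⟨a, b⟩ := p
    simp only [List.map_cons, List.nodup_cons] at h ⊢
    obtain ⟨hnot, hnd⟩ := h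
    rw [List.cons_eq_cons]
    refine ⟨?_, ?_⟩
    · simp [PySem.Dict.getD, PySem.Dict.get?_mk_cons]
    · have hstep : List.map (fun k => (k, (PySem.Dict.mk ((a, b) :: rest)).getD k PySem.Set.empty)) (rest.map Prod.fst)
          = List.map (fun k => (k, (PySem.Dict.mk rest).getD k PySem.Set.empty)) (rest.map Prod.fst) := by
        apply List.map_congr_left
        intro k hk
        have hne : (a == k) = false := by
          simp only [beq_eq_false_iff_ne, ne_eq]
          exact fun he => hnot (he ▸ hk)
        simp [PySem.Dict.getD, PySem.Dict.get?_mk_cons, hne]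
      rw [hstep]; exact ih hnd

theorem pv_main (tools : List (List (String × String))) :
    (List.map (fun p => (p.1, PySem.List.sorted p.2 (fun x => x) false))
      (List.filter (fun p => decide (PySem.Set.len p.2 > 1))
        ((List.foldl (fun d t => d.modify (pvNorm (pvDev t)) PySem.Set.empty (fun s => PySem.Set.add s (pvDev t))) PySem.Dict.empty tools).items)))
    = List.foldl (fun result key =>
        let names := PySem.List.sorted (PySem.Set.ofList (List.map Prod.snd (List.filter (fun p => p.1 == key) (List.map (fun t => (pvNorm (pvDev t), pvDev t)) tools)))) (fun x => x) false
        if names.length > 1 then result ++ [(key, names)] else result) [] (PySem.List.dedup (List.map Prod.fst (List.map (fun t => (pvNorm (pvDev t), pvDev t)) tools))) := by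
  have hvals : ∀ k, (List.filter (fun p => p.1 == k) (tools.map (fun t => (pvNorm (pvDev t), pvDev t)))).map Prod.snd
      = (tools.filter (fun t => pvNorm (pvDev t) == k)).map pvDev := by
    intro k; rw [List.filter_map, List.map_map]; rfl
  have hkeys2 : (tools.map (fun t => (pvNorm (pvDev t), pvDev t))).map Prod.fst = tools.map (fun t => pvNorm (pvDev t)) := by
    rw [List.map_map]; rfl
  have hkeys : (List.foldl (fun d t => d.modify (pvNorm (pvDev t)) PySem.Set.empty (fun s => PySem.Set.add s (pvDev t))) PySem.Dict.empty tools).keys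
      = PySem.Set.ofList (tools.map fun t => pvNorm (pvDev t)) := by
    rw [PySem.Dict.keys_foldl_modify_key tools (fun t => pvNorm (pvDev t)) PySem.Set.empty (fun _ t => fun s => PySem.Set.add s (pvDev t)) PySem.Dict.empty]
    simp [PySem.Dict.empty, PySem.Dict.keys, PySem.Set.update_nil_left]
  have hitems : (List.foldl (fun d t => d.modify (pvNorm (pvDev t)) PySem.Set.empty (fun s => PySem.Set.add s (pvDev t))) PySem.Dict.empty tools).items
      = (PySem.Set.ofList (tools.map fun t => pvNorm (pvDev t))).map
          (fun k => (k, PySem.Set.ofList ((tools.filter (fun t => pvNorm (pvDev t) == k)).map pvDev))) := by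
    set D := List.foldl (fun d t => d.modify (pvNorm (pvDev t)) PySem.Set.empty (fun s => PySem.Set.add s (pvDev t))) PySem.Dict.empty tools with hD
    have hnd : (D.items.map Prod.fst).Nodup := by
      have h1 : D.items.map Prod.fst = D.keys := rfl
      rw [h1, hkeys]; exact PySem.Set.nodup_ofList _
    have h0 := pv_items_eq_keys_map D.items hnd
    rw [show (D.items.map Prod.fst) = D.keys from rfl, hkeys] at h0
    rw [h0]
    apply List.map_congr_left; intro k hk
    have hmk : (PySem.Dict.mk D.items) = D := rfl
    rw [hmk, hD, pv_getD_fold]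
    simp [PySem.Dict.empty, PySem.Dict.getD, PySem.Dict.get?, PySem.Set.ofList_eq_foldl]
  rw [hkeys2, PySem.List.dedup_eq_ofList, hitems, List.filter_map, List.map_map]
  have hzeta : (fun (result : List (String × List String)) key =>
      let names := PySem.List.sorted (PySem.Set.ofList (List.map Prod.snd (List.filter (fun p => p.1 == key) (List.map (fun t => (pvNorm (pvDev t), pvDev t)) tools)))) (fun x => x) false
      if names.length > 1 then result ++ [(key, names)] else result)
      = (fun (result : List (String × List String)) key =>
      if (decide ((PySem.List.sorted (PySem.Set.ofList (List.map Prod.snd (List.filter (fun p => p.1 == key) (List.map (fun t => (pvNorm (pvDev t), pvDev t)) tools)))) (fun x => x) false).length > 1)) = true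
      then result ++ [(key, PySem.List.sorted (PySem.Set.ofList (List.map Prod.snd (List.filter (fun p => p.1 == key) (List.map (fun t => (pvNorm (pvDev t), pvDev t)) tools)))) (fun x => x) false)] else result) := by
    funext result key; simp only [decide_eq_true_eq]
  rw [hzeta, PySem.List.foldl_append_if]
  simp only [hvals, List.nil_append, Function.comp_def]
  exact congrArg _ (List.filter_congr fun k hk => by
    rw [decide_eq_decide]
    simp [PySem.Set.len, PySem.List.length_sorted])

theorem check_developer_duplicates_spec' (tools : List (List (String × String))) :
    check_developer_duplicates tools = check_developer_duplicates_alt tools := by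
  unfold check_developer_duplicates check_developer_duplicates_alt
  have hfun : (fun (devs : PySem.Dict String (PySem.Set String)) t =>
      let dev := pvDev t
      let normalized := pvNorm dev
      let devs' := if devs.contains normalized then devs else devs.insert normalized PySem.Set.empty
      devs'.modify normalized PySem.Set.empty (fun s => PySem.Set.add s dev))
      = fun devs t => devs.modify (pvNorm (pvDev t)) PySem.Set.empty (fun s => PySem.Set.add s (pvDev t)) :=
    funext fun d => funext fun t => pv_step_eq_modify d _ _
  rw [hfun]
  exact pv_main tools

-- ===== VERDICT (by name: the statement is the Claim_ definition above) =====
theorem check_developer_duplicates_spec : Claim_equal_check_developer_duplicates := by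
  intro tools _
  exact check_developer_duplicates_spec' tools
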